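-- pv_equiv track=rewrite | github.com/AdelZiani/Exo-recommandation | Recolte/Codes/IUTLabarre_06_01_06.py | annule_diagonales
-- ===== SOURCE A (Python) =====
-- def copie(t):
--     m = list()
--     for ligne in t:
--         nouvelle_ligne = list()
--         for x in ligne:
--             nouvelle_ligne.append(x)
--         m.append(nouvelle_ligne)
--     return m
--
-- def annule_diagonales(t):
--     n, m = len(t), len(t[0])
--     if n != m:
--         return t
--     m = copie(t)
--     for i in range(n):
--         m[i][i] = 0
--         m[i][n-1-i] = 0
--     return m
-- ===== SOURCE B (Python) =====
-- def annule_diagonales(t):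
--     n, m = len(t), len(t[0])
--     if n != m:
--         return t
--     return [[0 if (j == i or j == n - 1 - i) else t[i][j] for j in range(n)]
--             for i in range(n)]
-- ===== Notes on version B (the rewrite author's own statement) =====
-- stated objective: simpler
-- what changed: Replaces A's two-phase copy-then-patch (deep copy via a helper, then a second loop overwriting the diagonal cells in place) with a single construction pass that decides each cell with a conditional; no copy helper, no mutation.
-- outside the precondition, e.g. on annule_diagonales([[1, 2], [3, 4, 5]]): A returns [[0, 0], [0, 0, 5]], B returns [[0, 0], [0, 0]]; on annule_diagonales([[1, 2, 3], [4, 5], [6, 7, 8]]): A returns [[0, 2, 0], [4, 0], [0, 7, 0]], B raises IndexError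
import Mathlib
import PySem

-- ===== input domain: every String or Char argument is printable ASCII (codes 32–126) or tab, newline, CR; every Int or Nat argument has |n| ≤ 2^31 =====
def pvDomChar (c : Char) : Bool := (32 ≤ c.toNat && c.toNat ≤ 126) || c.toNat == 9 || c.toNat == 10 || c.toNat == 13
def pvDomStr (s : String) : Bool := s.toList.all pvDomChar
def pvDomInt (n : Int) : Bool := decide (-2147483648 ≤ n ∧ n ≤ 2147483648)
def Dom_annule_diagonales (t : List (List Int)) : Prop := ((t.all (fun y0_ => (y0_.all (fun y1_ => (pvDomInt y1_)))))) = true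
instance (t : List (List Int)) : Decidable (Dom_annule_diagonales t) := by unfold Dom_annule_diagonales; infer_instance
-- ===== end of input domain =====

-- B replaces A's copy-then-patch two-phase construction with a single conditional
-- construction pass (objective: simpler). Return-value equivalence only; A never
-- mutates its argument.

-- ===== PORT A =====
-- helper 'copie': builds the deep copy row by row with appends, as the Python does
def pyCopie (t : List (List Int)) : List (List Int) :=
  t.foldl (fun m ligne => m ++ [ligne.foldl (fun nl x => nl ++ [x]) []]) []

def annule_diagonales (t : List (List Int)) : List (List Int) :=
  let n := t.length
  let m0 := ((PySem.List.pyGet? t 0).getD []).length   -- t[0]: raises on empty t (excluded by Pre_)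
  if n ≠ m0 then t
  else
    -- for i in range(n): m[i][i] = 0; m[i][n-1-i] = 0
    (List.range n).foldl
      (fun m i => (m.modify i (fun row => row.set i 0)).modify i (fun row => row.set (n - 1 - i) 0))
      (pyCopie t)

-- ===== PORT B =====
def annule_diagonales_alt (t : List (List Int)) : List (List Int) :=
  let n := t.length
  let m0 := ((PySem.List.pyGet? t 0).getD []).length
  if n ≠ m0 then t
  else
    (List.range n).map (fun i =>
      (List.range n).map (fun j =>
        if j = i ∨ j = n - 1 - i then 0 else (t.getD i []).getD j 0))

-- ===== PRECONDITION & SPEC =====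
-- Pre_ excludes the empty list (A raises IndexError on t[0]) and ragged inputs whose
-- first-row length happens to equal the row count: there A's partial in-place zeroing of
-- whatever diagonal cells exist is an implementation artefact, and B's one-pass
-- construction raises (short rows) or yields rows of uniform length (long rows).
def Pre_annule_diagonales (t : List (List Int)) : Prop :=
  t ≠ [] ∧ (t.length = (t.headD []).length → ∀ row ∈ t, row.length = t.length)
instance (t : List (List Int)) : Decidable (Pre_annule_diagonales t) := by
  unfold Pre_annule_diagonales; infer_instance

def pvWitness_annule_diagonales : List (List Int) := [[1, 2, 3], [4, 5, 6], [7, 8, 9]]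

def Spec_annule_diagonales (t : List (List Int)) (out : List (List Int)) : Prop := out = annule_diagonales_alt t
instance (t : List (List Int)) (out : List (List Int)) : Decidable (Spec_annule_diagonales t out) := by unfold Spec_annule_diagonales; infer_instance

-- ===== CLAIM (what is proved, stated in full; the proofs are below) =====
def Claim_equal_annule_diagonales : Prop := ∀ (t : List (List Int)), Dom_annule_diagonales t → Pre_annule_diagonales t → Spec_annule_diagonales t (annule_diagonales t)

-- ===== LEMMAS AND PROOFS =====

-- A's copy helper returns the same list
theorem pyCopie_eq (t : List (List Int)) : pyCopie t = t := by
  unfold pyCopie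
  rw [PySem.List.foldl_append_singleton_eq_map]
  have h : ∀ l : List Int, l.foldl (fun nl x => nl ++ [x]) [] = l := fun l => by
    simpa using PySem.List.foldl_append_singleton_eq_self (l := l) (acc := [])
  have h2 : t.map (List.foldl (fun nl x => nl ++ [x]) []) = t.map id :=
    List.map_congr_left (fun l _ => h l)
  simpa using h2

-- characterisation of the zeroing loop on a uniform square matrix, by prefix length
theorem loop_char (t : List (List Int)) (n : Nat) (hn : t.length = n)
    (hrow : ∀ row ∈ t, row.length = n) (k : Nat) (hk : k ≤ n) :
    (List.range k).foldl
      (fun m i => (m.modify i (fun row => row.set i 0)).modify i (fun row => row.set (n - 1 - i) 0))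
      t
    = (List.range n).map (fun i =>
        if i < k then
          (List.range n).map (fun j =>
            if j = i ∨ j = n - 1 - i then 0 else (t.getD i []).getD j 0)
        else t.getD i []) := by
  induction k with
  | zero =>
      simp only [List.range_zero, List.foldl_nil]
      apply List.ext_getElem
      · simp [hn]
      · intro i h1 h2
        simp [List.getD_eq_getElem?_getD, List.getElem?_eq_getElem h1]
  | succ k ih =>
      have hk' : k ≤ n := Nat.le_of_succ_le hk
      rw [List.range_succ, List.foldl_append, ih hk']
      apply List.ext_getElem
      · simp
      · intro i h1 h2
        have hkn : k < n := hk
        have hkt : k < t.length := by omega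
        have hgk : t.getD k [] = t[k] := by
          simp [List.getD_eq_getElem?_getD, List.getElem?_eq_getElem hkt]
        have hrk : (t.getD k []).length = n := by
          rw [hgk]; exact hrow _ (List.getElem_mem hkt)
        have hrk' : ((t[k]?).getD []).length = n := by
          simpa [List.getD_eq_getElem?_getD] using hrk
        simp only [List.foldl_cons, List.foldl_nil]
        rw [List.getElem_modify, List.getElem_modify]
        simp only [List.getElem_map, List.getElem_range]
        by_cases hik : k = i
        · subst hik
          simp only [if_pos (Nat.lt_succ_self k), if_neg (Nat.lt_irrefl k), if_true]
          apply List.ext_getElem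
          · simpa [hrk] using hrk
          · intro j hj1 hj2
            rw [List.getElem_set, List.getElem_set]
            simp only [List.getElem_map, List.getElem_range]
            have hjn : j < n := by
              simp only [List.length_set] at hj1
              simpa [hrk'] using hj1
            by_cases h1' : n - 1 - k = j
            · simp [h1', eq_comm]
            · by_cases h2' : k = j
              · simp [h2', eq_comm]
              · have : ¬ (j = k ∨ j = n - 1 - k) := by
                  push Not; exact ⟨fun h => h2' h.symm, fun h => h1' h.symm⟩
                have hb : j < ((t[k]?).getD []).length := by rw [hrk']; exact hjn
                simp [h1', h2', this, List.getD_eq_getElem?_getD, List.getElem?_eq_getElem hb]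
        · rw [if_neg hik, if_neg hik]
          have hin : i < List.length (List.range n) := by simpa using h2
          by_cases hlt : i < k
          · simp [hlt, Nat.lt_succ_of_lt hlt]
          · have : ¬ i < k + 1 := by omega
            simp [hlt, this]

-- final shape: at k = n the 'else' branch is gone
theorem loop_full (t : List (List Int)) (n : Nat) (hn : t.length = n)
    (hrow : ∀ row ∈ t, row.length = n) :
    (List.range n).foldl
      (fun m i => (m.modify i (fun row => row.set i 0)).modify i (fun row => row.set (n - 1 - i) 0))
      t
    = (List.range n).map (fun i =>
        (List.range n).map (fun j =>
          if j = i ∨ j = n - 1 - i then 0 else (t.getD i []).getD j 0)) := by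
  rw [loop_char t n hn hrow n (Nat.le_refl n)]
  apply List.map_congr_left
  intro i hi
  simp [List.mem_range.mp hi]

-- ===== VERDICT (by name: the statement is the Claim_ definition above) =====
theorem annule_diagonales_spec : Claim_equal_annule_diagonales := by
  intro t _ hpre
  obtain ⟨hne, huni⟩ := hpre
  unfold Spec_annule_diagonales annule_diagonales annule_diagonales_alt
  have hget0 : (PySem.List.pyGet? t 0).getD [] = t.head?.getD [] := by
    cases t with
    | nil => simp at hne
    | cons a l => simp [PySem.List.pyGet?, PySem.List.pyIdx?]
  simp only [hget0]
  by_cases hsq : t.length = (t.head?.getD []).length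
  · rw [if_neg (not_not_intro hsq), if_neg (not_not_intro hsq), pyCopie_eq]
    have hrows : ∀ row ∈ t, row.length = t.length :=
      huni (by simpa [List.headD_eq_head?_getD] using hsq)
    have hl := loop_full t t.length rfl hrows
    simpa [List.getD_eq_getElem?_getD] using hl
  · rw [if_pos hsq, if_pos hsq]
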